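-- pv_equiv track=rewrite | github.com/Sjauser01/core | employee/main.py | recursive_increment
-- ===== SOURCE A (Python) =====
-- def increment_alphabet_recursive(char):
--     if char.islower():  # Lowercase 'a-z'
--         if char == 'z':
--             return 'a', True
--         else:
--             return chr(ord(char) + 1), False
--     elif char.isupper():  # Uppercase 'A-Z'
--         if char == 'Z':
--             return 'A', True
--         else:
--             return chr(ord(char) + 1), False
--     return char, False
--
-- def increment_number_recursive(number_str):
--     length = len(number_str)
--     number = int(number_str)
--
--     if number == 10 ** length - 1:  # If it's the max number like 9999
--         return '0' * length, True   # Roll over to 0000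
--     else:
--         return str(number + 1).zfill(length), False
--
-- def recursive_increment(s_list, index):
--     # If index is out of bounds, return without cascading further
--     if index < 0:
--         return s_list
--
--     char = s_list[index]
--
--     # If it's a digit, handle numeric increment
--     if char.isdigit():
--         num_start = index
--         while num_start >= 0 and s_list[num_start].isdigit():
--             num_start -= 1
--
--         num_start += 1
--         numeric_part = ''.join(s_list[num_start:index + 1])
--         new_number, carry = increment_number_recursive(numeric_part)
--         s_list[num_start:index + 1] = list(new_number)
--
--         if carry:
--             return recursive_increment(s_list, num_start - 1)
--
--     # If it's an alphabet, handle alphabet increment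
--     elif char.isalpha():
--         new_char, carry = increment_alphabet_recursive(char)
--         s_list[index] = new_char
--
--         if carry:
--             return recursive_increment(s_list, index - 1)
--
--     return s_list
-- ===== SOURCE B (Python) =====
-- def recursive_increment(s_list, index):
--     i = index
--     while i >= 0:
--         c = s_list[i]
--         if c.isdigit():
--             j = i
--             while j > 0 and s_list[j - 1].isdigit():
--                 j -= 1
--             block = ''.join(s_list[j:i + 1])
--             n = int(block)
--             if n == 10 ** len(block) - 1:
--                 s_list[j:i + 1] = '0' * len(block)
--                 i = j - 1
--             else:
--                 s_list[j:i + 1] = str(n + 1).zfill(len(block))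
--                 break
--         elif c.isalpha():
--             if c == 'z':
--                 s_list[i] = 'a'
--                 i -= 1
--             elif c == 'Z':
--                 s_list[i] = 'A'
--                 i -= 1
--             elif len(c) == 1:
--                 s_list[i] = chr(ord(c) + 1)
--                 break
--             else:
--                 break
--         else:
--             break
--     return s_list
-- ===== Notes on version B (the rewrite author's own statement) =====
-- stated objective: simpler
-- what changed: Replaces A's recursion-with-helper-functions by a single iterative descending-pointer loop with break/continue (same int()+zfill block arithmetic), and the alphabet helper's islower/isupper dispatch by direct 'z'/'Z' comparisons.
import Mathlib
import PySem

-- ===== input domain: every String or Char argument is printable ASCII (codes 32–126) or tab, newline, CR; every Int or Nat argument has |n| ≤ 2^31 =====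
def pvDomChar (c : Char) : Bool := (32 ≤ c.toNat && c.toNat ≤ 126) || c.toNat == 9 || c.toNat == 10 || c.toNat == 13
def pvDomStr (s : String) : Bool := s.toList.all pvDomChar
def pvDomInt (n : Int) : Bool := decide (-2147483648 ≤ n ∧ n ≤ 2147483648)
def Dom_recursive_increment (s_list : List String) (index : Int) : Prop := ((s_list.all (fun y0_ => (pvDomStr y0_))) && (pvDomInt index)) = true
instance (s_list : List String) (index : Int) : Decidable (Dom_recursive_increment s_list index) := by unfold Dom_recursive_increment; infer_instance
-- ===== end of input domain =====

-- B replaces A's recursion and helper functions by a single descending-pointer loop with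
-- break/continue (same int()+zfill block arithmetic), for simplicity; both mutate s_list in
-- place in Python — the equivalence proved here is about the returned value (which is the
-- same mutated list object in both).


-- ===== PORT A =====

-- increment_alphabet_recursive; str.islower()/str.isupper() are hand-ported (exact on ASCII,
-- where the cased characters are exactly the letters); ord(char) raises TypeError when
-- len(char) ≠ 1 — those inputs lie outside Pre_ (the fallback arm returns char unchanged).
def pvIncAlpha (char : String) : String × Bool :=
  if char.toList.any PySem.Chars.islower && char.toList.all (fun c => !PySem.Chars.isupper c) then
    if char = "z" then ("a", true)
    else match char.toList with
      | [c] => (String.ofList [Char.ofNat (c.toNat + 1)], false)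
      | _ => (char, false)
  else if char.toList.any PySem.Chars.isupper && char.toList.all (fun c => !PySem.Chars.islower c) then
    if char = "Z" then ("A", true)
    else match char.toList with
      | [c] => (String.ofList [Char.ofNat (c.toNat + 1)], false)
      | _ => (char, false)
  else (char, false)

-- increment_number_recursive; int() never fails on the nonempty all-digit strings this is
-- called on (the getD 0 default is unreachable there)
def pvIncNumber (number_str : String) : String × Bool :=
  let length := PySem.Str.len number_str
  let number := (PySem.Int.ofStr? number_str).getD 0
  if number = 10 ^ length.toNat - 1 then (String.ofList (List.replicate length.toNat '0'), true)
  else (PySem.Str.zfill (PySem.Int.toStr (number + 1)) length, false)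

-- the 'while num_start >= 0 and s_list[num_start].isdigit(): num_start -= 1' loop
def pvFindNumStart (s : List String) (i : Int) : Int :=
  if 0 ≤ i ∧ PySem.Str.strIsdigit (PySem.List.pyGetD s i "") then pvFindNumStart s (i - 1) else i
termination_by (i + 1).toNat
decreasing_by omega

-- recursive_increment as a fuel loop: the fuel (index+2 at top level) only makes totality
-- syntactically evident — each recursive call strictly decreases index, so it never runs out
def pvALoop (fuel : Nat) (s_list : List String) (index : Int) : List String :=
  match fuel with
  | 0 => s_list   -- unreachable: fuel > index + 1 throughout
  | fuel + 1 =>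
    if index < 0 then s_list else
    match PySem.List.pyGet? s_list index with
    | none => s_list   -- IndexError: excluded by Pre_
    | some char =>
      if PySem.Str.strIsdigit char then
        let num_start := pvFindNumStart s_list index + 1
        let numeric_part := PySem.Str.join "" (PySem.List.slice s_list (some num_start) (some (index + 1)))
        let res := pvIncNumber numeric_part
        let s' := PySem.List.slice s_list none (some num_start)
                    ++ res.1.toList.map (fun c => String.ofList [c])
                    ++ PySem.List.slice s_list (some (index + 1)) none
        if res.2 then pvALoop fuel s' (num_start - 1) else s'
      else if PySem.Str.strIsalpha char then
        let res := pvIncAlpha char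
        let s' := s_list.set index.toNat res.1
        if res.2 then pvALoop fuel s' (index - 1) else s'
      else s_list

def recursive_increment (s_list : List String) (index : Int) : List String :=
  pvALoop ((index + 1).toNat + 1) s_list index

-- ===== PORT B =====

-- the 'while j > 0 and s_list[j-1].isdigit(): j -= 1' loop
def pvFindJ (s : List String) (j : Int) : Int :=
  if 1 ≤ j ∧ PySem.Str.strIsdigit (PySem.List.pyGetD s (j - 1) "") then pvFindJ s (j - 1) else j
termination_by j.toNat
decreasing_by omega

-- the single 'while i >= 0' loop of Source B, as a fuel loop (same remark on fuel as for A)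
def pvBLoop (fuel : Nat) (s_list : List String) (i : Int) : List String :=
  match fuel with
  | 0 => s_list   -- unreachable: fuel > i + 1 throughout
  | fuel + 1 =>
    if i < 0 then s_list else   -- while-loop exit
    match PySem.List.pyGet? s_list i with
    | none => s_list   -- IndexError: outside Pre_
    | some c =>
      if PySem.Str.strIsdigit c then
        let j := pvFindJ s_list i
        let block := PySem.Str.join "" (PySem.List.slice s_list (some j) (some (i + 1)))
        let n := (PySem.Int.ofStr? block).getD 0
        if n = 10 ^ (PySem.Str.len block).toNat - 1 then
          -- s_list[j:i+1] = '0' * len(block); i = j - 1; continue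
          pvBLoop fuel
            (PySem.List.slice s_list none (some j)
              ++ (List.replicate (PySem.Str.len block).toNat '0').map (fun ch => String.ofList [ch])
              ++ PySem.List.slice s_list (some (i + 1)) none) (j - 1)
        else
          -- s_list[j:i+1] = str(n+1).zfill(len(block)); break
          PySem.List.slice s_list none (some j)
            ++ (PySem.Str.zfill (PySem.Int.toStr (n + 1)) (PySem.Str.len block)).toList.map (fun ch => String.ofList [ch])
            ++ PySem.List.slice s_list (some (i + 1)) none
      else if PySem.Str.strIsalpha c then
        if c = "z" then pvBLoop fuel (s_list.set i.toNat "a") (i - 1)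
        else if c = "Z" then pvBLoop fuel (s_list.set i.toNat "A") (i - 1)
        else if PySem.Str.len c = 1 then
          s_list.set i.toNat (match c.toList with
            | [ch] => String.ofList [Char.ofNat (ch.toNat + 1)]
            | _ => c)
        else s_list
      else s_list

def recursive_increment_alt (s_list : List String) (index : Int) : List String :=
  pvBLoop ((index + 1).toNat + 1) s_list index

-- ===== PRECONDITION & SPEC =====

-- an element through which the carry propagates: a nonempty all-'9' digit string, or "z"/"Z"
def pvCarryPass (e : String) : Bool :=
  (!e.toList.isEmpty && e.toList.all (fun c => c = '9')) || e = "z" || e = "Z"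

-- a multi-character uniformly-cased ASCII-alphabetic element: A raises TypeError
-- (ord of a multi-character string) when the carry chain reaches it
def pvHazard (e : String) : Bool :=
  2 ≤ e.toList.length && e.toList.all PySem.Chars.isalpha
    && (e.toList.all PySem.Chars.islower || e.toList.all PySem.Chars.isupper)

-- Pre_ excludes exactly the inputs on which A raises: index >= len(s_list) (IndexError),
-- and inputs whose carry chain from index reaches a multi-character uniformly-cased
-- alphabetic element (TypeError): the first non-carry-passing element at or left of index
-- must not be such an element.
def Pre_recursive_increment (s_list : List String) (index : Int) : Prop :=
  index < (s_list.length : Int) ∧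
    (((s_list.take (index + 1).toNat).reverse.dropWhile pvCarryPass).head?.all
      (fun e => !pvHazard e)) = true
instance (s_list : List String) (index : Int) : Decidable (Pre_recursive_increment s_list index) := by
  unfold Pre_recursive_increment; infer_instance

def pvWitness_recursive_increment : List String × Int := (["a", "9"], 1)

def Spec_recursive_increment (s_list : List String) (index : Int) (out : List String) : Prop := out = recursive_increment_alt s_list index
instance (s_list : List String) (index : Int) (out : List String) : Decidable (Spec_recursive_increment s_list index out) := by unfold Spec_recursive_increment; infer_instance

-- ===== CLAIM (what is proved, stated in full; the proofs are below) =====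
def Claim_equal_recursive_increment : Prop := ∀ (s_list : List String) (index : Int), Dom_recursive_increment s_list index → Pre_recursive_increment s_list index → Spec_recursive_increment s_list index (recursive_increment s_list index)

-- ===== LEMMAS AND PROOFS =====

theorem pv_pyGetD_eq {α : Type} (s : List α) (i : Int) (c d : α)
    (h : PySem.List.pyGet? s i = some c) : PySem.List.pyGetD s i d = c := by
  simp [PySem.List.pyGetD, h]

-- A's backward scan (stopped one too far, then +1) computes B's scan result
theorem pv_fns_eq_findJ (s : List String) (i : Int) (h0 : 0 ≤ i)
    (hd : PySem.Str.strIsdigit (PySem.List.pyGetD s i "") = true) :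
    pvFindNumStart s i + 1 = pvFindJ s i := by
  fun_induction pvFindJ s i with
  | case1 i h ih =>
    rw [pvFindNumStart, if_pos ⟨h0, hd⟩]
    exact ih (by omega) h.2
  | case2 i h =>
    rw [pvFindNumStart, if_pos ⟨h0, hd⟩]
    rcases Decidable.em (1 ≤ i) with hi | hi
    · have hn : ¬ (0 ≤ i - 1 ∧ PySem.Str.strIsdigit (PySem.List.pyGetD s (i - 1) "") = true) := by
        intro ⟨_, hdd⟩; exact h ⟨hi, hdd⟩
      rw [pvFindNumStart, if_neg hn]; omega
    · have hn : ¬ (0 ≤ i - 1 ∧ PySem.Str.strIsdigit (PySem.List.pyGetD s (i - 1) "") = true) := by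
        intro ⟨hh, _⟩; omega
      rw [pvFindNumStart, if_neg hn]; omega

-- writing back the element just read is a no-op
theorem pv_set_self (s : List String) (i : Int) (c : String)
    (h : PySem.List.pyGet? s i = some c) (h0 : 0 ≤ i) : s.set i.toNat c = s := by
  have hc : s[i.toNat]? = some c := by
    rcases Decidable.em (i < (s.length : Int)) with hl | hl
    · simpa [PySem.List.pyGet?, PySem.List.pyIdx?, h0, hl] using h
    · simp [PySem.List.pyGet?, PySem.List.pyIdx?, h0, hl] at h
  obtain ⟨hi, rfl⟩ := List.getElem?_eq_some_iff.mp hc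
  simp

theorem pv_lower_not_upper (c : Char) (h : PySem.Chars.islower c = true) :
    PySem.Chars.isupper c = false := by
  simp [PySem.Chars.islower, Char.le_def, UInt32.le_iff_toNat_le] at h
  simp [PySem.Chars.isupper, Char.le_def, UInt32.le_iff_toNat_le]
  omega

theorem pv_upper_not_lower (c : Char) (h : PySem.Chars.isupper c = true) :
    PySem.Chars.islower c = false := by
  simp [PySem.Chars.isupper, Char.le_def, UInt32.le_iff_toNat_le] at h
  simp [PySem.Chars.islower, Char.le_def, UInt32.le_iff_toNat_le]
  omega

-- the two loops agree at every fuel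
theorem pv_loop_eq (fuel : Nat) : ∀ (s : List String) (i : Int),
    pvALoop fuel s i = pvBLoop fuel s i := by
  induction fuel with
  | zero => intro s i; rfl
  | succ fuel ih =>
    intro s i
    rw [pvALoop, pvBLoop]
    by_cases h0 : i < 0
    · simp [h0]
    rw [if_neg h0, if_neg h0]
    cases hg : PySem.List.pyGet? s i with
    | none => rfl
    | some char =>
      dsimp only
      by_cases hd : PySem.Str.strIsdigit char = true
      · -- digit branch: A's num_start equals B's j, everything else is the same expression
        rw [if_pos hd, if_pos hd]
        have hj : pvFindNumStart s i + 1 = pvFindJ s i :=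
          pv_fns_eq_findJ s i (by omega) (by rw [pv_pyGetD_eq s i char "" hg]; exact hd)
        simp only [pvIncNumber, hj]
        split
        · simp only [ih, String.toList_ofList]
          rfl
        · rfl
      · rw [if_neg hd, if_neg hd]
        by_cases ha : PySem.Str.strIsalpha char = true
        · rw [if_pos ha, if_pos ha]
          by_cases hz : char = "z"
          · subst hz; simp [show pvIncAlpha "z" = ("a", true) from rfl, ih]
          by_cases hZ : char = "Z"
          · subst hZ; simp [show pvIncAlpha "Z" = ("A", true) from rfl, ih]
          -- not "z" / "Z": case on the character list of char
          rw [if_neg hz, if_neg hZ]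
          have hlen : PySem.Str.len char = (char.toList.length : Int) := by
            simp [PySem.Str.len_eq]
          match hcl : char.toList with
          | [] =>
            -- impossible: ''.isalpha() is False
            rw [PySem.Str.strIsalpha_eq, hcl] at ha
            simp [PySem.Chars.strIsalpha] at ha
          | [c] =>
            have h1 : PySem.Str.len char = 1 := by rw [hlen, hcl]; rfl
            rw [if_pos h1]
            have hcase : PySem.Chars.islower c = true ∨ PySem.Chars.isupper c = true := by
              rw [PySem.Str.strIsalpha_eq, hcl] at ha
              simp [PySem.Chars.strIsalpha, PySem.Chars.isalpha] at ha
              tauto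
            rcases hcase with hc | hc
            · -- lowercase, not 'z'
              have : pvIncAlpha char = (String.ofList [Char.ofNat (c.toNat + 1)], false) := by
                rw [pvIncAlpha, if_pos (by simp [hcl, hc, pv_lower_not_upper c hc]), if_neg hz, hcl]
              simp [this]
            · have : pvIncAlpha char = (String.ofList [Char.ofNat (c.toNat + 1)], false) := by
                rw [pvIncAlpha,
                  if_neg (by simp [hcl, pv_upper_not_lower c hc]),
                  if_pos (by simp [hcl, hc, pv_upper_not_lower c hc]), if_neg hZ, hcl]
              simp [this]
          | c :: d :: rest =>
            have h1 : ¬ PySem.Str.len char = 1 := by rw [hlen, hcl]; simp; omega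
            rw [if_neg h1]
            have hres : pvIncAlpha char = (char, false) := by
              simp [pvIncAlpha, hz, hZ, hcl]
            rw [hres]
            simp [pv_set_self s i char hg (by omega)]
        · rw [if_neg ha, if_neg ha]

-- ===== VERDICT (by name: the statement is the Claim_ definition above) =====
theorem recursive_increment_spec : Claim_equal_recursive_increment := by
  intro s i _ _
  unfold Spec_recursive_increment
  rw [recursive_increment, recursive_increment_alt, pv_loop_eq]
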